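-- pv_equiv track=rewrite | github.com/bluckpolevault/vr-compilation-maker | scripts/multi_movie_cuts.py | bracketed_good_thumbs
-- ===== SOURCE A (Python) =====
-- def bracketed_good_thumbs(thumbs, n=1):
--     series_length = 2*n + 1
--     thumbs = sorted(thumbs, key=lambda t: t[0])
--     good_thumbs = []
--     for thumb, rating in thumbs:
--         if rating == 1:
--             good_thumbs.append(thumb)
--         else:
--             good_thumbs = []
--         if len(good_thumbs) >= series_length:
--             yield good_thumbs[-(n + 1)]
-- ===== SOURCE B (Python) =====
-- def bracketed_good_thumbs(thumbs, n=1):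
--     s = sorted(thumbs, key=lambda t: t[0])
--     m = len(s)
--     i = 0
--     while i < m:
--         if s[i][1] != 1:
--             i += 1
--             continue
--         j = i
--         while j < m and s[j][1] == 1:
--             j += 1
--         run = [t for t, _ in s[i:j]]
--         yield from run[n:len(run)-n]
--         i = j
-- ===== Notes on version B (the rewrite author's own statement) =====
-- stated objective: alternative
-- what changed: B replaces A's threshold-triggered per-step yield from a growing run list (reset on bad ratings, indexed from the end) by a two-pointer scan over the sorted list that delimits each maximal good run [i:j] and then emits its interior slice run[n:len(run)-n] in one go.
-- outside the precondition, e.g. on bracketed_good_thumbs([(0, 1), (1, 1)], -1): A returns [0, 0], B returns [1]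
import Mathlib
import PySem

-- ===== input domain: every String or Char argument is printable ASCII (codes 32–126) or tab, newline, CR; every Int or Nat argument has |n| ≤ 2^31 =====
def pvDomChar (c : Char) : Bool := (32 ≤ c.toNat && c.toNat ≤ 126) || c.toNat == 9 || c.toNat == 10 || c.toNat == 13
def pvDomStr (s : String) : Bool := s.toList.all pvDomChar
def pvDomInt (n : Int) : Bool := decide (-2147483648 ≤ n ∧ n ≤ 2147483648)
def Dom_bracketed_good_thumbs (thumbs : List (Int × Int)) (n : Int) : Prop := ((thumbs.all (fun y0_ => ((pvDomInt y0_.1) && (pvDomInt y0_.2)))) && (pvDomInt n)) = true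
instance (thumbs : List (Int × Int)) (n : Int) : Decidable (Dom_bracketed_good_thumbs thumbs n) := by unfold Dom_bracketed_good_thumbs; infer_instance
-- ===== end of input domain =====

-- B replaces A's reset-on-bad run-list with a per-step end-indexed yield by a two-pointer scan
-- that delimits each maximal good run and slices out its interior (objective: alternative).


-- ===== PORT A =====
-- A's loop: state = good_thumbs (the current run's thumb values); the yielded values are
-- collected in order.  good_thumbs[-(n+1)] is PySem.List.pyGet?; under Pre_ (0 ≤ n) the
-- index is always in range when the yield fires, so '.getD 0' is exact there.
def bgtLoopA (n : Int) : List (Int × Int) → List Int → List Int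
  | [], _ => []
  | (t, r) :: rest, gt =>
    let gt' := if r == 1 then gt ++ [t] else []
    let ys := if (2 * n + 1 : Int) ≤ (gt'.length : Int) then
        [(PySem.List.pyGet? gt' (-(n + 1))).getD 0] else []
    ys ++ bgtLoopA n rest gt'

def bracketed_good_thumbs (thumbs : List (Int × Int)) (n : Int) : List Int :=
  bgtLoopA n (PySem.List.sorted thumbs (fun t => t.1) false) []

-- ===== PORT B =====
-- Source B's inner 'while j < m and s[j][1] == 1: j += 1' starting from j:
def bgtRunEnd (s : List (Int × Int)) (j : Nat) : Nat :=
  if h : j < s.length then (if s[j].2 == 1 then bgtRunEnd s (j + 1) else j) else j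
termination_by s.length - j

theorem bgtRunEnd_ge (s : List (Int × Int)) (j : Nat) : j ≤ bgtRunEnd s j := by
  fun_induction bgtRunEnd s j with
  | case1 j h hg ih => omega
  | case2 j h hg => omega
  | case3 j h => omega

theorem bgtRunEnd_gt (s : List (Int × Int)) (i : Nat) (h : i < s.length)
    (hg : (s[i].2 == 1) = true) : i < bgtRunEnd s i := by
  unfold bgtRunEnd
  rw [dif_pos h, if_pos hg]
  have := bgtRunEnd_ge s (i + 1)
  omega

-- Source B's outer while loop over the index i into the sorted list s:
-- skip a bad entry; otherwise delimit the maximal good run s[i:j] and emit run[n:len(run)-n].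
def bgtOuter (n : Int) (s : List (Int × Int)) (i : Nat) : List Int :=
  if h : i < s.length then
    if hg : s[i].2 == 1 then
      let j := bgtRunEnd s i
      let run := (PySem.List.slice s (some (i : Int)) (some (j : Int))).map Prod.fst
      PySem.List.slice run (some n) (some ((run.length : Int) - n)) ++ bgtOuter n s j
    else bgtOuter n s (i + 1)
  else []
termination_by s.length - i
decreasing_by
  · have := bgtRunEnd_gt s i h hg
    omega
  · omega

def bracketed_good_thumbs_alt (thumbs : List (Int × Int)) (n : Int) : List Int :=
  let s := PySem.List.sorted thumbs (fun t => t.1) false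
  bgtOuter n s 0

-- ===== PRECONDITION & SPEC =====
-- Pre_ restricts to the bracket radius's natural domain 0 ≤ n: for negative n, A's
-- negative-index arithmetic either raises IndexError or yields accidental run-prefix
-- values, and B's middle slice reads a different accidental suffix there.
def Pre_bracketed_good_thumbs (thumbs : List (Int × Int)) (n : Int) : Prop := 0 ≤ n
instance (thumbs : List (Int × Int)) (n : Int) : Decidable (Pre_bracketed_good_thumbs thumbs n) := by unfold Pre_bracketed_good_thumbs; infer_instance

def pvWitness_bracketed_good_thumbs : (List (Int × Int)) × Int := ([(0, 1), (1, 1), (2, 1)], 1)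

def Spec_bracketed_good_thumbs (thumbs : List (Int × Int)) (n : Int) (out : List Int) : Prop := out = bracketed_good_thumbs_alt thumbs n
instance (thumbs : List (Int × Int)) (n : Int) (out : List Int) : Decidable (Spec_bracketed_good_thumbs thumbs n out) := by unfold Spec_bracketed_good_thumbs; infer_instance

-- ===== CLAIM (what is proved, stated in full; the proofs are below) =====
def Claim_equal_bracketed_good_thumbs : Prop := ∀ (thumbs : List (Int × Int)) (n : Int), Dom_bracketed_good_thumbs thumbs n → Pre_bracketed_good_thumbs thumbs n → Spec_bracketed_good_thumbs thumbs n (bracketed_good_thumbs thumbs n)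

-- ===== LEMMAS AND PROOFS =====

-- Interior of a run: the elements vs[L-1-n] for run lengths L in (c, vs.length] with L ≥ 2n+1.
def bgtMid (nn c : Nat) (vs : List Int) : List Int :=
  (vs.take (vs.length - nn)).drop (max c (2 * nn) - nn)

theorem bgtMid_full (nn c : Nat) (vs : List Int) (h : vs.length ≤ c) :
    bgtMid nn c vs = [] := by
  apply List.drop_eq_nil_of_le
  simp
  omega

theorem bgtMid_step (nn c : Nat) (vs : List Int) (hc : c < vs.length) (h2 : 2 * nn ≤ c) :
    bgtMid nn c vs = vs.getD (c - nn) 0 :: bgtMid nn (c + 1) vs := by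
  unfold bgtMid
  have h1 : max c (2 * nn) = c := by omega
  have h1' : max (c + 1) (2 * nn) = c + 1 := by omega
  have hw : c - nn < (vs.take (vs.length - nn)).length := by
    simp; omega
  rw [h1, h1', List.drop_eq_getElem_cons hw, List.getElem_take,
    List.getD_eq_getElem vs 0 (by omega)]
  have : c + 1 - nn = (c - nn) + 1 := by omega
  rw [this]

theorem bgtMid_step' (nn c : Nat) (vs : List Int) (h2 : c < 2 * nn) :
    bgtMid nn c vs = bgtMid nn (c + 1) vs := by
  unfold bgtMid
  have h1 : max c (2 * nn) = 2 * nn := by omega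
  have h1' : max (c + 1) (2 * nn) = 2 * nn := by omega
  rw [h1, h1']

-- A over a block of good ratings, from run state gt: emits the interior indices past gt,
-- ends in state gt ++ thumbs of the block.
theorem bgtLoopA_good_block (n : Int) (hn : 0 ≤ n) :
    ∀ (g rest : List (Int × Int)) (gt : List Int), (∀ p ∈ g, p.2 = 1) →
      bgtLoopA n (g ++ rest) gt =
        bgtMid n.toNat gt.length (gt ++ g.map Prod.fst) ++ bgtLoopA n rest (gt ++ g.map Prod.fst) := by
  intro g
  induction g with
  | nil =>
    intro rest gt _
    simp [bgtMid_full n.toNat gt.length gt (by omega)]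
  | cons p g' ih =>
    intro rest gt hgood
    obtain ⟨t, r⟩ := p
    have hr : (r == 1) = true := by simpa using hgood (t, r) (by simp)
    have hnn : ((n.toNat : Int)) = n := Int.toNat_of_nonneg hn
    simp only [List.cons_append, bgtLoopA, hr, if_pos]
    have hrec := ih (rest := rest) (gt := gt ++ [t]) (fun p hp => hgood p (by simp [hp]))
    have hvs : (gt ++ [t]) ++ g'.map Prod.fst = gt ++ ((t, r) :: g').map Prod.fst := by simp
    rw [hvs] at hrec
    rw [hrec]
    set vs := gt ++ ((t, r) :: g').map Prod.fst with hvsdef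
    have hlenvs : vs.length = gt.length + 1 + g'.length := by simp [hvsdef]; omega
    have hlen1 : (gt ++ [t]).length = gt.length + 1 := by simp
    by_cases hy : 2 * n.toNat ≤ gt.length
    · have hcond : (2 * n + 1 : Int) ≤ (((gt ++ [t]).length : Nat) : Int) := by
        rw [hlen1]; push_cast; omega
      rw [if_pos hcond]
      have hget : PySem.List.pyGet? (gt ++ [t]) (-(n + 1)) =
          (gt ++ [t])[(gt ++ [t]).length - (n.toNat + 1)]? := by
        rw [show (-(n + 1) : Int) = -((n.toNat + 1 : Nat) : Int) by push_cast [hnn]; ring]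
        exact PySem.List.pyGet?_neg_natCast _ _ (by omega) (by rw [hlen1]; omega)
      have hidx : (gt ++ [t]).length - (n.toNat + 1) = gt.length - n.toNat := by
        rw [hlen1]; omega
      have hlt : gt.length - n.toNat < (gt ++ [t]).length := by rw [hlen1]; omega
      have hv : ((gt ++ [t])[gt.length - n.toNat]?).getD 0 = vs.getD (gt.length - n.toNat) 0 := by
        rw [hvsdef, show gt ++ ((t, r) :: g').map Prod.fst = (gt ++ [t]) ++ g'.map Prod.fst by simp,
          List.getD_eq_getElem?_getD, List.getElem?_append_left hlt]
      rw [hget, hidx, hv, bgtMid_step n.toNat gt.length vs (by omega) hy]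
      simp
    · have hcond : ¬ ((2 * n + 1 : Int) ≤ (((gt ++ [t]).length : Nat) : Int)) := by
        rw [hlen1]; push_cast; omega
      rw [if_neg hcond, bgtMid_step' n.toNat gt.length vs (by omega)]
      simp [hlen1]

-- A after a bad rating: run resets, nothing is yielded.
theorem bgtLoopA_reset (n : Int) (hn : 0 ≤ n) (t r : Int) (hr : ¬ (r == 1) = true)
    (rest : List (Int × Int)) (gt : List Int) :
    bgtLoopA n ((t, r) :: rest) gt = bgtLoopA n rest [] := by
  simp only [bgtLoopA]
  rw [if_neg hr, if_neg (by simp; omega)]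
  simp

theorem bgtRunEnd_le (s : List (Int × Int)) (j : Nat) (hj : j ≤ s.length) :
    bgtRunEnd s j ≤ s.length := by
  fun_induction bgtRunEnd s j with
  | case1 j h hg ih => exact ih (by omega)
  | case2 j h hg => omega
  | case3 j h => omega

-- bgtRunEnd characterisation as takeWhile/dropWhile.
theorem bgtRunEnd_take (s : List (Int × Int)) : ∀ i : Nat,
    (s.drop i).takeWhile (fun p => p.2 == 1) = (s.drop i).take (bgtRunEnd s i - i) := by
  intro i
  fun_induction bgtRunEnd s i with
  | case1 i h hg ih =>
    rw [List.drop_eq_getElem_cons h, List.takeWhile_cons_of_pos (by simpa using hg), ih]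
    have hE := bgtRunEnd_ge s (i + 1)
    have : bgtRunEnd s (i + 1) - i = (bgtRunEnd s (i + 1) - (i + 1)) + 1 := by omega
    rw [this, List.take_succ_cons]
  | case2 i h hg =>
    rw [List.drop_eq_getElem_cons h, List.takeWhile_cons_of_neg (by simpa using hg)]
    simp
  | case3 i h =>
    rw [List.drop_eq_nil_of_le (by omega)]
    simp

theorem bgtRunEnd_drop (s : List (Int × Int)) : ∀ i : Nat,
    (s.drop i).dropWhile (fun p => p.2 == 1) = s.drop (bgtRunEnd s i) := by
  intro i
  fun_induction bgtRunEnd s i with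
  | case1 i h hg ih =>
    rw [List.drop_eq_getElem_cons h, List.dropWhile_cons_of_pos (by simpa using hg), ih]
  | case2 i h hg =>
    rw [List.drop_eq_getElem_cons h, List.dropWhile_cons_of_neg (by simpa using hg),
      ← List.drop_eq_getElem_cons h]
  | case3 i h =>
    rw [List.drop_eq_nil_of_le (by omega)]
    simp

-- The common shape: sort, split into maximal good runs, emit each interior.
def bgtRuns (nn : Nat) : List (Int × Int) → List Int
  | [] => []
  | (t, r) :: rest =>
    if _hr : r == 1 then
      bgtMid nn 0 ((((t, r) :: rest).takeWhile (fun p => p.2 == 1)).map Prod.fst) ++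
        bgtRuns nn (((t, r) :: rest).dropWhile (fun p => p.2 == 1))
    else bgtRuns nn rest
termination_by l => l.length
decreasing_by
  · rw [List.dropWhile_cons_of_pos (by simpa using _hr)]
    simpa using Nat.lt_succ_of_le (List.length_dropWhile_le (fun p => p.2 == 1) rest)
  · simp

-- the head of a nonempty dropWhile fails the predicate
theorem bgtDropWhile_head_bad (p : Int × Int → Bool) (l : List (Int × Int)) (q qs)
    (h : l.dropWhile p = q :: qs) : ¬ p q = true := by
  have h1 := List.head_dropWhile_not p (l := l) (by rw [h]; simp)
  have h2 : (l.dropWhile p).head (by rw [h]; simp) = q := by simp [h]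
  rw [h2] at h1; simp [h1]

theorem bgtLoopA_eq_runs (n : Int) (hn : 0 ≤ n) :
    ∀ l : List (Int × Int), bgtLoopA n l [] = bgtRuns n.toNat l := by
  have key : ∀ k, ∀ l : List (Int × Int), l.length ≤ k → bgtLoopA n l [] = bgtRuns n.toNat l := by
    intro k
    induction k with
    | zero =>
      intro l hl
      have : l = [] := List.eq_nil_of_length_eq_zero (by omega)
      subst this
      simp [bgtLoopA, bgtRuns]
    | succ k ih =>
      intro l hl
      match l with
      | [] => simp [bgtLoopA, bgtRuns]
      | (t, r) :: rest =>
        by_cases hr : (r == 1) = true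
        · have hsplit := (List.takeWhile_append_dropWhile
            (p := fun p => p.2 == 1) (l := (t, r) :: rest)).symm
          have hgood : ∀ p ∈ ((t, r) :: rest).takeWhile (fun p => p.2 == 1), p.2 = 1 := by
            intro p hp
            have := List.mem_takeWhile_imp hp
            simpa using this
          conv_lhs => rw [hsplit]
          rw [bgtLoopA_good_block n hn _ _ [] hgood]
          rw [bgtRuns, dif_pos hr]
          simp only [List.nil_append, List.length_nil]
          congr 1
          cases hdw : ((t, r) :: rest).dropWhile (fun p => p.2 == 1) with
          | nil => simp [bgtLoopA, bgtRuns]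
          | cons q qs =>
            obtain ⟨t2, r2⟩ := q
            have hbad : ¬ (r2 == 1) = true := by
              simpa using bgtDropWhile_head_bad _ _ _ _ hdw
            rw [bgtLoopA_reset n hn t2 r2 hbad]
            have hlen : qs.length ≤ k := by
              have h1 : (((t, r) :: rest).dropWhile (fun p => p.2 == 1)).length ≤ rest.length := by
                rw [List.dropWhile_cons_of_pos (by simpa using hr)]
                exact List.length_dropWhile_le _ _
              rw [hdw] at h1
              simp at h1 hl
              omega
            rw [ih qs hlen, bgtRuns, dif_neg hbad]
        · rw [bgtLoopA_reset n hn t r hr, bgtRuns, dif_neg hr]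
          exact ih rest (by simp at hl; omega)
  intro l
  exact key l.length l le_rfl

-- run[n:len(run)-n] is the run's interior
theorem bgtSlice_mid (n : Int) (hn : 0 ≤ n) (run : List Int) :
    PySem.List.slice run (some n) (some ((run.length : Int) - n)) = bgtMid n.toNat 0 run := by
  obtain ⟨m, rfl⟩ : ∃ m : Nat, n = (m : Int) := ⟨n.toNat, (Int.toNat_of_nonneg hn).symm⟩
  simp only [Int.toNat_natCast]
  have hmid : bgtMid m 0 run = (run.drop m).take (run.length - m - m) := by
    unfold bgtMid
    rw [show max 0 (2 * m) - m = m by omega, List.drop_take]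
  by_cases hle : m ≤ run.length
  · rw [show ((run.length : Int) - (m : Int)) = (((run.length - m : Nat)) : Int) by omega,
      PySem.List.slice_natCast, hmid]
  · have hlen : (PySem.List.slice run (some ((m : Nat) : Int))
        (some ((run.length : Int) - m))).length = 0 := by
      rw [PySem.List.length_slice]
      have h2 : PySem.List.clampIdx run.length ((run.length : Int) - m) =
          run.length - (m - run.length) := by
        rw [show ((run.length : Int) - m) = -(((m - run.length : Nat)) : Int) by omega]
        exact PySem.List.clampIdx_neg_natCast _ _ (by omega)
      rw [h2, PySem.List.clampIdx_natCast]
      omega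
    rw [List.eq_nil_of_length_eq_zero hlen, hmid, show run.length - m - m = 0 by omega]
    simp

theorem bgtOuter_eq_runs (n : Int) (hn : 0 ≤ n) (s : List (Int × Int)) :
    ∀ i : Nat, bgtOuter n s i = bgtRuns n.toNat (s.drop i) := by
  have key : ∀ k i, s.length - i ≤ k → bgtOuter n s i = bgtRuns n.toNat (s.drop i) := by
    intro k
    induction k with
    | zero =>
      intro i hi
      rw [bgtOuter, dif_neg (by omega), List.drop_eq_nil_of_le (by omega)]
      simp [bgtRuns]
    | succ k ih =>
      intro i hi
      by_cases h : i < s.length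
      · by_cases hg : (s[i].2 == 1) = true
        · have hj := bgtRunEnd_gt s i h hg
          have hjle : bgtRunEnd s i ≤ s.length := bgtRunEnd_le s i (by omega)
          rw [bgtOuter]
          simp only [dif_pos h, dif_pos hg]
          rw [ih (bgtRunEnd s i) (by omega)]
          rcases heq : s[i] with ⟨t, r⟩
          have hdropi : s.drop i = (t, r) :: s.drop (i + 1) := by
            rw [List.drop_eq_getElem_cons h, heq]
          rw [hdropi, bgtRuns, dif_pos (by rw [heq] at hg; simpa using hg), ← hdropi,
            bgtRunEnd_take s i, bgtRunEnd_drop s i, PySem.List.slice_natCast,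
            bgtSlice_mid n hn]
        · rw [bgtOuter]
          simp only [dif_pos h, dif_neg hg]
          rw [ih (i + 1) (by omega)]
          rcases heq : s[i] with ⟨t, r⟩
          have hdropi : s.drop i = (t, r) :: s.drop (i + 1) := by
            rw [List.drop_eq_getElem_cons h, heq]
          rw [hdropi, bgtRuns, dif_neg (by rw [heq] at hg; simpa using hg)]
      · rw [bgtOuter, dif_neg h, List.drop_eq_nil_of_le (by omega)]
        simp [bgtRuns]
  intro i
  exact key (s.length - i) i le_rfl

-- ===== VERDICT (by name: the statement is the Claim_ definition above) =====
theorem bracketed_good_thumbs_spec : Claim_equal_bracketed_good_thumbs := by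
  intro thumbs n _ hpre
  show bracketed_good_thumbs thumbs n = bracketed_good_thumbs_alt thumbs n
  unfold bracketed_good_thumbs bracketed_good_thumbs_alt
  rw [bgtLoopA_eq_runs n hpre, bgtOuter_eq_runs n hpre _ 0, List.drop_zero]
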